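-- pv_equiv track=rewrite | github.com/RaviWella/CheXplain | src/llm_explainer.py | _simplify_features
-- ===== SOURCE A (Python) =====
-- def _simplify_features(technical_features: str, disease: str) -> str:
--     """
--     Convert technical features to patient-friendly language
--
--     Args:
--         technical_features: Technical description
--         disease: Disease name
--
--     Returns:
--         Simplified description
--     """
--     simplifications = {
--         "focal abnormality pattern": "a specific area that looks different",
--         "diffuse pattern": "changes spread across the lungs",
--         "high intensity": "strong signal",
--         "consolidation": "fluid or infection in the air sacs",
--         "opacity": "cloudy area",
--         "infiltration": "fluid buildup",
--     }
--
--     simplified = technical_features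
--     for tech, simple in simplifications.items():
--         simplified = simplified.replace(tech, simple)
--
--     return simplified
-- ===== SOURCE B (Python) =====
-- def _simplify_features(technical_features: str, disease: str) -> str:
--     """Single left-to-right pass: at each position replace the (unique) matching
--     technical term, instead of six sequential full-string .replace scans."""
--     simplifications = {
--         "focal abnormality pattern": "a specific area that looks different",
--         "diffuse pattern": "changes spread across the lungs",
--         "high intensity": "strong signal",
--         "consolidation": "fluid or infection in the air sacs",
--         "opacity": "cloudy area",
--         "infiltration": "fluid buildup",
--     }
--     out = []
--     i = 0
--     n = len(technical_features)
--     while i < n: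
--         for tech, simple in simplifications.items():
--             if technical_features.startswith(tech, i):
--                 out.append(simple)
--                 i += len(tech)
--                 break
--         else:
--             out.append(technical_features[i])
--             i += 1
--     return "".join(out)
-- ===== Notes on version B (the rewrite author's own statement) =====
-- stated objective: alternative
-- what changed: B makes a single left-to-right pass over the string, replacing the unique matching term at each position, instead of A's six sequential full-string str.replace passes; this is valid because no term's first character occurs inside another term's match region and no replacement text can recreate a term.
import Mathlib
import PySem

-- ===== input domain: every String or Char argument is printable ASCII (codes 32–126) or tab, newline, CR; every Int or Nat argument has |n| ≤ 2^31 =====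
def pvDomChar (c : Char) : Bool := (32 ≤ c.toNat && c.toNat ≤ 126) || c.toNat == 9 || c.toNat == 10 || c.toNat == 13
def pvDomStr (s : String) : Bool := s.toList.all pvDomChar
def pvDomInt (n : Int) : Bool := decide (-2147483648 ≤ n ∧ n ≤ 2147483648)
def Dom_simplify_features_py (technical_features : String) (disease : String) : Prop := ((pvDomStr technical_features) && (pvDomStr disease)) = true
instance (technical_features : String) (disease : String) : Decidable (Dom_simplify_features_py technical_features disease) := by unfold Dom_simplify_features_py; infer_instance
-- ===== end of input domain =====

-- B replaces six sequential full-string .replace passes by a single left-to-right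
-- scan that rewrites the first matching term at each position (alternative, same cost).


-- ===== PORT A =====
-- A: build the simplifications dict, then fold str.replace over its items.
def simplify_features_py (technical_features : String) (disease : String) : String :=
  let simplifications : PySem.Dict String String :=
    ((((((PySem.Dict.empty.insert "focal abnormality pattern" "a specific area that looks different").insert
      "diffuse pattern" "changes spread across the lungs").insert
      "high intensity" "strong signal").insert
      "consolidation" "fluid or infection in the air sacs").insert
      "opacity" "cloudy area").insert
      "infiltration" "fluid buildup")
  simplifications.items.foldl
    (fun simplified p => PySem.Str.replace simplified p.1 p.2) technical_features

-- ===== PORT B =====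
-- B: the (term, replacement) pairs in dict order.
def pvPairs : List (List Char × List Char) :=
  [("focal abnormality pattern".toList, "a specific area that looks different".toList),
   ("diffuse pattern".toList, "changes spread across the lungs".toList),
   ("high intensity".toList, "strong signal".toList),
   ("consolidation".toList, "fluid or infection in the air sacs".toList),
   ("opacity".toList, "cloudy area".toList),
   ("infiltration".toList, "fluid buildup".toList)]

-- B's single pass (Source B's while loop with the for/else over the dict items):
-- at each position the first pair whose key matches is emitted and skipped,
-- otherwise the character is copied.
def pvMultiRep (K : List (List Char × List Char)) : List Char → List Char
  | [] => []
  | c :: t =>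
    match K.find? (fun pr => pr.1.isPrefixOf (c :: t)) with
    | some pr =>
      if _h : pr.1.length = 0 then c :: pvMultiRep K t
      else pr.2 ++ pvMultiRep K ((c :: t).drop pr.1.length)
    | none => c :: pvMultiRep K t
termination_by s => s.length
decreasing_by
  all_goals simp only [List.length_drop, List.length_cons]
  all_goals omega

def simplify_features_py_alt (technical_features : String) (disease : String) : String :=
  String.ofList (pvMultiRep pvPairs technical_features.toList)

-- ===== PRECONDITION & SPEC =====
def Spec_simplify_features_py (technical_features : String) (disease : String) (out : String) : Prop := out = simplify_features_py_alt technical_features disease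
instance (technical_features : String) (disease : String) (out : String) : Decidable (Spec_simplify_features_py technical_features disease out) := by unfold Spec_simplify_features_py; infer_instance

-- ===== CLAIM (what is proved, stated in full; the proofs are below) =====
def Claim_equal_simplify_features_py : Prop := ∀ (technical_features : String) (disease : String), Dom_simplify_features_py technical_features disease → Spec_simplify_features_py technical_features disease (simplify_features_py technical_features disease)

-- ===== LEMMAS AND PROOFS =====

-- unfolding lemmas for the scan
theorem pvMR_nilS (K : List (List Char × List Char)) : pvMultiRep K [] = [] := by
  unfold pvMultiRep
  rfl

theorem pvMR_none (K : List (List Char × List Char)) (c : Char) (t : List Char)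
    (h : K.find? (fun pr => pr.1.isPrefixOf (c :: t)) = none) :
    pvMultiRep K (c :: t) = c :: pvMultiRep K t := by
  conv_lhs => unfold pvMultiRep
  rw [h]

theorem pvMR_some (K : List (List Char × List Char)) (c : Char) (t : List Char)
    (pr : List Char × List Char)
    (h : K.find? (fun pr => pr.1.isPrefixOf (c :: t)) = some pr) (hlen : ¬ pr.1.length = 0) :
    pvMultiRep K (c :: t) = pr.2 ++ pvMultiRep K ((c :: t).drop pr.1.length) := by
  conv_lhs => unfold pvMultiRep
  rw [h]
  simp only [dif_neg hlen]

theorem pvTakePrefix (k u t : List Char) (h : k <+: u ++ t) : u.take k.length <+: k :=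
  List.prefix_of_prefix_length_le ((List.take_prefix _ _).trans (List.prefix_append u t)) h
    (by simp)

-- pass-through: no key of K can match starting inside u, so the scan copies u verbatim
theorem pvPass (K : List (List Char × List Char)) (u : List Char)
    (h : ∀ p < u.length, ∀ pr ∈ K, ¬ ((u.drop p).take pr.1.length <+: pr.1)) :
    ∀ (t : List Char), pvMultiRep K (u ++ t) = u ++ pvMultiRep K t := by
  induction u with
  | nil => intro t; simp
  | cons c u' ih =>
    intro t
    have hnone : K.find? (fun pr => pr.1.isPrefixOf (c :: (u' ++ t))) = none := by
      rw [List.find?_eq_none]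
      intro pr hpr hb
      have hpre : pr.1 <+: (c :: u') ++ t := by
        simpa using List.isPrefixOf_iff_prefix.mp hb
      exact h 0 (by simp) pr hpr (by simpa using pvTakePrefix pr.1 (c :: u') t hpre)
    rw [List.cons_append, pvMR_none K c (u' ++ t) hnone,
      ih (fun p hp pr hpr => h (p + 1) (by simpa using hp) pr hpr)]
    simp

-- matching head: if (k', o') ∈ K (keys nonempty, first characters pairwise distinct)
-- then the scan on k' ++ x fires exactly the pair (k', o')
theorem pvFindStable : ∀ (K : List (List Char × List Char)) (k' o' : List Char),
    (k', o') ∈ K → (∀ pr ∈ K, pr.1 ≠ []) →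
    (K.map (fun pr => pr.1.head?)).Pairwise (· ≠ ·) →
    ∀ x, K.find? (fun pr => pr.1.isPrefixOf (k' ++ x)) = some (k', o') := by
  intro K
  induction K with
  | nil => intro k' o' hmem; cases hmem
  | cons pr0 K' ih =>
    intro k' o' hmem hne hpw x
    rcases List.mem_cons.mp hmem with heq | hmem'
    · subst heq
      have hb : k'.isPrefixOf (k' ++ x) = true :=
        List.isPrefixOf_iff_prefix.mpr (List.prefix_append _ _)
      simp [hb]
    · have hk'ne : k' ≠ [] := hne (k', o') hmem
      have hhead : pr0.1.head? ≠ k'.head? := by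
        have hmm : k'.head? ∈ K'.map (fun pr => pr.1.head?) :=
          List.mem_map.mpr ⟨(k', o'), hmem', rfl⟩
        exact (List.pairwise_cons.mp (by simpa using hpw)).1 _ hmm
      have hfalse : pr0.1.isPrefixOf (k' ++ x) = false := by
        apply Bool.eq_false_iff.mpr
        intro hb
        have hpre := List.isPrefixOf_iff_prefix.mp hb
        obtain ⟨a, l1, h1⟩ := List.exists_cons_of_ne_nil (hne pr0 List.mem_cons_self)
        obtain ⟨b, l2, h2⟩ := List.exists_cons_of_ne_nil hk'ne
        rw [h1, h2, List.cons_append, List.cons_prefix_cons] at hpre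
        apply hhead
        rw [h1, h2]
        simp [hpre.1]
      rw [List.find?_cons, hfalse]
      exact ih k' o' hmem' (fun pr h => hne pr (List.mem_cons_of_mem _ h))
        (List.pairwise_cons.mp (by simpa using hpw)).2 x

theorem pvMatchHead (K : List (List Char × List Char)) (k' o' x : List Char)
    (hmem : (k', o') ∈ K) (hne : ∀ pr ∈ K, pr.1 ≠ [])
    (hpw : (K.map (fun pr => pr.1.head?)).Pairwise (· ≠ ·)) :
    pvMultiRep K (k' ++ x) = o' ++ pvMultiRep K x := by
  have hkne : k' ≠ [] := hne (k', o') hmem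
  have hfe := pvFindStable K k' o' hmem hne hpw x
  obtain ⟨a, k1, hkk⟩ := List.exists_cons_of_ne_nil hkne
  have hsc : k' ++ x = a :: (k1 ++ x) := by rw [hkk]; rfl
  rw [hsc] at hfe
  have hlen : ¬ ((k', o') : List Char × List Char).1.length = 0 := by simp [hkk]
  have h := pvMR_some K a (k1 ++ x) (k', o') hfe hlen
  rw [hsc, h, ← hsc, List.drop_left]

-- replacing k by o cannot create a new occurrence of k' at the head:
-- any suffix of k' that is a prefix of the output was already a prefix of the input
theorem pvNoNew (k o k' : List Char) (hk : k ≠ [])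
    (hE : ∀ m < k'.length, ¬ (k'.drop m <+: o) ∧ ¬ (o <+: k'.drop m)) :
    ∀ (s : List Char) (m : Nat), m < k'.length →
      (k'.drop m) <+: pvMultiRep [(k, o)] s → (k'.drop m) <+: s := by
  intro s
  induction s with
  | nil =>
    intro m hm hp
    rw [pvMR_nilS] at hp
    have h0 : k'.drop m = [] := List.prefix_nil.mp hp
    rw [List.drop_eq_nil_iff] at h0
    omega
  | cons c t ih =>
    intro m hm hp
    by_cases hks : k.isPrefixOf (c :: t)
    · rw [pvMR_some [(k, o)] c t (k, o) (by simp [hks]) (by simpa using hk)] at hp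
      rcases List.prefix_or_prefix_of_prefix hp (List.prefix_append o _) with h1 | h2
      · exact absurd h1 (hE m hm).1
      · exact absurd h2 (hE m hm).2
    · rw [pvMR_none [(k, o)] c t (by simp [hks])] at hp
      rw [List.drop_eq_getElem_cons hm] at hp ⊢
      rw [List.cons_prefix_cons] at hp ⊢
      refine ⟨hp.1, ?_⟩
      by_cases hm1 : m + 1 < k'.length
      · exact ih (m + 1) hm1 hp.2
      · have h0 : k'.drop (m + 1) = [] := List.drop_eq_nil_iff.mpr (by omega)
        simp [h0]

-- the crux: one single-key replace followed by the scan over the remaining keys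
-- equals the scan over all the keys
theorem pvCrux (k o : List Char) (K : List (List Char × List Char))
    (hk : k ≠ [])
    (hKne : ∀ pr ∈ K, pr.1 ≠ [])
    (hpw : (((k, o) :: K).map (fun pr => pr.1.head?)).Pairwise (· ≠ ·))
    (hC : ∀ pr ∈ K, ∀ p < pr.1.length, ¬ ((pr.1.drop p).take k.length <+: k))
    (hO : ∀ p < o.length, ∀ pr ∈ K, ¬ ((o.drop p).take pr.1.length <+: pr.1))
    (hE : ∀ pr ∈ K, ∀ m < pr.1.length, ¬ (pr.1.drop m <+: o) ∧ ¬ (o <+: pr.1.drop m)) :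
    ∀ (s : List Char), pvMultiRep K (pvMultiRep [(k, o)] s) = pvMultiRep ((k, o) :: K) s := by
  have hne1 : ∀ pr ∈ ((k, o) :: K), pr.1 ≠ [] := by
    intro pr hpr
    rcases List.mem_cons.mp hpr with h | h
    · rw [h]; exact hk
    · exact hKne pr h
  have hneS : ∀ pr ∈ ([(k, o)] : List (List Char × List Char)), pr.1 ≠ [] := by
    intro pr hpr
    rw [List.mem_singleton] at hpr
    rw [hpr]
    exact hk
  have main : ∀ (n : Nat) (s : List Char), s.length ≤ n →
      pvMultiRep K (pvMultiRep [(k, o)] s) = pvMultiRep ((k, o) :: K) s := by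
    intro n
    induction n with
    | zero =>
      intro s hs
      have h0 : s = [] := List.length_eq_zero_iff.mp (Nat.le_zero.mp hs)
      subst h0
      simp only [pvMR_nilS]
    | succ n ih =>
      intro s hs
      cases s with
      | nil => simp only [pvMR_nilS]
      | cons c t =>
        have hklen : 0 < k.length := List.length_pos_iff.mpr hk
        by_cases hks : k.isPrefixOf (c :: t)
        · have hkpre := List.isPrefixOf_iff_prefix.mp hks
          have hsplit : c :: t = k ++ (c :: t).drop k.length := by
            conv_lhs => rw [← List.take_append_drop k.length (c :: t)]
            rw [← List.prefix_iff_eq_take.mp hkpre]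
          have ht'len : ((c :: t).drop k.length).length ≤ n := by
            simp only [List.length_drop, List.length_cons]
            simp only [List.length_cons] at hs
            omega
          rw [hsplit,
            pvMatchHead [(k, o)] k o _ (List.mem_singleton.mpr rfl) hneS (by simp),
            pvMatchHead ((k, o) :: K) k o _ List.mem_cons_self hne1 hpw,
            pvPass K o hO,
            ih _ ht'len]
        · cases hfind : K.find? (fun pr => pr.1.isPrefixOf (c :: t)) with
          | some pr =>
            have hmem : pr ∈ K := List.mem_of_find?_eq_some hfind
            have hmem' : (pr.1, pr.2) ∈ K := by simpa using hmem
            have hprb := List.find?_some hfind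
            simp only at hprb
            have hpre : pr.1 <+: (c :: t) := List.isPrefixOf_iff_prefix.mp hprb
            have hprne : pr.1 ≠ [] := hKne pr hmem
            have hprlen : 0 < pr.1.length := List.length_pos_iff.mpr hprne
            have hsplit : c :: t = pr.1 ++ (c :: t).drop pr.1.length := by
              conv_lhs => rw [← List.take_append_drop pr.1.length (c :: t)]
              rw [← List.prefix_iff_eq_take.mp hpre]
            have hulen : ((c :: t).drop pr.1.length).length ≤ n := by
              simp only [List.length_drop, List.length_cons]
              simp only [List.length_cons] at hs
              omega
            have hpwK : (K.map (fun pr => pr.1.head?)).Pairwise (· ≠ ·) :=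
              (List.pairwise_cons.mp (by simpa using hpw)).2
            rw [hsplit,
              pvPass [(k, o)] pr.1
                (by
                  intro p hp pr2 hpr2
                  rw [List.mem_singleton] at hpr2
                  subst hpr2
                  exact hC pr hmem p hp),
              pvMatchHead K pr.1 pr.2 _ hmem' hKne hpwK,
              pvMatchHead ((k, o) :: K) pr.1 pr.2 _ (List.mem_cons_of_mem _ hmem') hne1 hpw,
              ih _ hulen]
          | none =>
            have h1 : pvMultiRep [(k, o)] (c :: t) = c :: pvMultiRep [(k, o)] t :=
              pvMR_none [(k, o)] c t (by simp [hks])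
            have hnone2 : K.find? (fun pr => pr.1.isPrefixOf (c :: pvMultiRep [(k, o)] t)) = none := by
              rw [List.find?_eq_none]
              intro pr hpr hb
              have hpre : pr.1 <+: pvMultiRep [(k, o)] (c :: t) := by
                rw [h1]
                exact List.isPrefixOf_iff_prefix.mp hb
              have hprlen : 0 < pr.1.length := List.length_pos_iff.mpr (hKne pr hpr)
              have hback : pr.1 <+: (c :: t) := by
                have h0 := pvNoNew k o pr.1 hk (hE pr hpr) (c :: t) 0 hprlen
                  (by simpa using hpre)
                simpa using h0
              exact (List.find?_eq_none.mp hfind pr hpr) (List.isPrefixOf_iff_prefix.mpr hback)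
            rw [h1, pvMR_none K c (pvMultiRep [(k, o)] t) hnone2,
              pvMR_none ((k, o) :: K) c t (by simp [hks, hfind]),
              ih t (by simp only [List.length_cons] at hs; omega)]
  intro s
  exact main s.length s le_rfl

-- PySem's str.replace (nonempty pattern) is exactly the single-key scan
theorem pvGo (old new : List Char) (hold : old ≠ []) :
    ∀ (fuel : Nat) (l acc : List Char), l.length ≤ fuel →
      PySem.Chars.replace.go old new fuel l acc = acc.reverse ++ pvMultiRep [(old, new)] l := by
  have holdlen : ¬ old.length = 0 := by simpa using hold
  intro fuel
  induction fuel with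
  | zero =>
    intro l acc h
    have h0 : l = [] := List.length_eq_zero_iff.mp (Nat.le_zero.mp h)
    subst h0
    rw [PySem.Chars.replace.go.eq_def, pvMR_nilS]
  | succ n ih =>
    intro l acc h
    cases l with
    | nil =>
      rw [PySem.Chars.replace.go.eq_def, pvMR_nilS]
      simp
    | cons c t =>
      rw [PySem.Chars.replace.go.eq_def]
      by_cases hpf : old.isPrefixOf (c :: t)
      · simp only [hpf, if_true]
        have hdl : ((c :: t).drop old.length).length ≤ n := by
          simp only [List.length_drop, List.length_cons]
          simp only [List.length_cons] at h
          omega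
        rw [ih _ _ hdl,
          pvMR_some [(old, new)] c t (old, new) (by simp [hpf]) holdlen]
        simp
      · simp only [hpf, Bool.false_eq_true, if_false]
        have htl : t.length ≤ n := by
          simp only [List.length_cons] at h
          omega
        rw [ih _ _ htl, pvMR_none [(old, new)] c t (by simp [hpf])]
        simp

theorem pvReplaceEq (l old new : List Char) (hold : old ≠ []) :
    PySem.Chars.replace l old new = pvMultiRep [(old, new)] l := by
  rw [PySem.Chars.replace, if_neg (by simpa using hold),
    pvGo old new hold l.length l [] le_rfl]
  simp

theorem pvMultiRep_nilK : ∀ (s : List Char), pvMultiRep [] s = s := by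
  intro s
  induction s with
  | nil => exact pvMR_nilS []
  | cons c t ih => rw [pvMR_none [] c t (by simp), ih]

-- ===== VERDICT (by name: the statement is the Claim_ definition above) =====
set_option maxHeartbeats 2000000 in
theorem simplify_features_py_spec : Claim_equal_simplify_features_py := by
  intro technical_features disease _hdom
  unfold Spec_simplify_features_py
  rw [← String.toList_inj]
  have hA : simplify_features_py technical_features disease =
      PySem.Str.replace (PySem.Str.replace (PySem.Str.replace (PySem.Str.replace (PySem.Str.replace (PySem.Str.replace technical_features
        "focal abnormality pattern" "a specific area that looks different")
        "diffuse pattern" "changes spread across the lungs")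
        "high intensity" "strong signal")
        "consolidation" "fluid or infection in the air sacs")
        "opacity" "cloudy area")
        "infiltration" "fluid buildup" := rfl
  have hB : (simplify_features_py_alt technical_features disease).toList
      = pvMultiRep pvPairs technical_features.toList := by
    simp [simplify_features_py_alt, String.toList_ofList]
  rw [hA, hB]
  simp only [PySem.Str.toList_replace]
  rw [pvReplaceEq _ ("infiltration".toList) ("fluid buildup".toList) (by decide),
    pvReplaceEq _ ("opacity".toList) ("cloudy area".toList) (by decide),
    pvReplaceEq _ ("consolidation".toList) ("fluid or infection in the air sacs".toList) (by decide),
    pvReplaceEq _ ("high intensity".toList) ("strong signal".toList) (by decide),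
    pvReplaceEq _ ("diffuse pattern".toList) ("changes spread across the lungs".toList) (by decide),
    pvReplaceEq _ ("focal abnormality pattern".toList) ("a specific area that looks different".toList) (by decide)]
  have e1 := pvCrux ("focal abnormality pattern".toList) ("a specific area that looks different".toList)
    [("diffuse pattern".toList, "changes spread across the lungs".toList),
     ("high intensity".toList, "strong signal".toList),
     ("consolidation".toList, "fluid or infection in the air sacs".toList),
     ("opacity".toList, "cloudy area".toList),
     ("infiltration".toList, "fluid buildup".toList)]
    (by decide) (by decide) (by decide) (by decide) (by decide) (by decide)
  have e2 := pvCrux ("diffuse pattern".toList) ("changes spread across the lungs".toList)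
    [("high intensity".toList, "strong signal".toList),
     ("consolidation".toList, "fluid or infection in the air sacs".toList),
     ("opacity".toList, "cloudy area".toList),
     ("infiltration".toList, "fluid buildup".toList)]
    (by decide) (by decide) (by decide) (by decide) (by decide) (by decide)
  have e3 := pvCrux ("high intensity".toList) ("strong signal".toList)
    [("consolidation".toList, "fluid or infection in the air sacs".toList),
     ("opacity".toList, "cloudy area".toList),
     ("infiltration".toList, "fluid buildup".toList)]
    (by decide) (by decide) (by decide) (by decide) (by decide) (by decide)
  have e4 := pvCrux ("consolidation".toList) ("fluid or infection in the air sacs".toList)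
    [("opacity".toList, "cloudy area".toList),
     ("infiltration".toList, "fluid buildup".toList)]
    (by decide) (by decide) (by decide) (by decide) (by decide) (by decide)
  have e5 := pvCrux ("opacity".toList) ("cloudy area".toList)
    [("infiltration".toList, "fluid buildup".toList)]
    (by decide) (by decide) (by decide) (by decide) (by decide) (by decide)
  have e6 := pvCrux ("infiltration".toList) ("fluid buildup".toList) []
    (by decide) (by decide) (by decide) (by decide) (by decide) (by decide)
  unfold pvPairs
  rw [← e1, ← e2, ← e3, ← e4, ← e5, ← e6, pvMultiRep_nilK]
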